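-- pv_equiv track=rewrite | github.com/emiliskan/algos | contest/28738/e.py | calc
-- ===== SOURCE A (Python) =====
-- def calc(n: int, folders: list):
--
--     max = 0
--
--     for i in range(n):
--         if folders[i] > folders[max]:
--             max = i
--
--     count = 0
--     for i in range(n):
--         if i == max:
--             continue
--
--         count += folders[i]
--
--     return count
-- ===== SOURCE B (Python) =====
-- def calc(n: int, folders: list):
--     # One pass: keep a running "current max" and a running sum of everything
--     # already demoted from being the max; the skipped element is always the
--     # current maximum, so the old max joins the sum whenever a bigger one appears.
--     if n <= 0:
--         return 0
--     acc = 0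
--     mx = None
--     for x in folders[:n]:
--         if mx is None:
--             mx = x
--         elif x > mx:
--             acc += mx
--             mx = x
--         else:
--             acc += x
--     return acc
-- ===== Notes on version B (the rewrite author's own statement) =====
-- stated objective: alternative
-- what changed: Replaces A's two staged index loops (argmax-index search, then a skip-that-index summation) with a single pass over folders[:n] maintaining two accumulators: the current maximum and the sum of all elements demoted from being the maximum, so no index bookkeeping or second pass exists.
import Mathlib
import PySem

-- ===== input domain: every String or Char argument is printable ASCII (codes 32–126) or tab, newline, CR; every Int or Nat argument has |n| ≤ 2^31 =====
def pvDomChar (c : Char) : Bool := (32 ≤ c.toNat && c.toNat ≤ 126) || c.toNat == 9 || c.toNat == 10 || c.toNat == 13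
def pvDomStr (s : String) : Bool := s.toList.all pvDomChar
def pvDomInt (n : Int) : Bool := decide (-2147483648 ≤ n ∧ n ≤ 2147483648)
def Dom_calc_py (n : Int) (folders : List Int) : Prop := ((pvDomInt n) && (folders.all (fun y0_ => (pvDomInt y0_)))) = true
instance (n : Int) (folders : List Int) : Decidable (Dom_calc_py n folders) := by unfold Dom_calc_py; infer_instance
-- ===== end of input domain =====

-- B makes a single pass over folders[:n] with two accumulators (current max, sum of
-- demoted elements) instead of A's argmax-index loop followed by a skip-index summation
-- loop (objective: alternative decomposition; return-value equivalence only).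


-- ===== PORT A =====
-- pyGetD is exact here: Pre_ guarantees every index 0 ≤ i < n is in range.
def calc_py (n : Int) (folders : List Int) : Int :=
  let mx := (PySem.List.pyRange 0 n 1).foldl
    (fun m i => if PySem.List.pyGetD folders i 0 > PySem.List.pyGetD folders m 0 then i else m) 0
  (PySem.List.pyRange 0 n 1).foldl
    (fun c i => if i == mx then c else c + PySem.List.pyGetD folders i 0) 0

-- ===== PORT B =====
-- state = (acc, mx); mx = none mirrors Python's 'mx is None'.
def calc_py_alt (n : Int) (folders : List Int) : Int :=
  if n ≤ 0 then 0
  else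
    ((PySem.List.slice folders none (some n)).foldl
      (fun (s : Int × Option Int) x =>
        match s.2 with
        | none => (s.1, some x)
        | some m => if x > m then (s.1 + m, some x) else (s.1 + x, s.2))
      (0, none)).1

-- ===== PRECONDITION & SPEC =====
-- Pre_ excludes exactly the inputs where A raises IndexError: 0 < n with fewer than n elements.
def Pre_calc_py (n : Int) (folders : List Int) : Prop :=
  n ≤ PySem.List.len folders ∨ n ≤ 0
instance (n : Int) (folders : List Int) : Decidable (Pre_calc_py n folders) := by
  unfold Pre_calc_py; infer_instance
def pvWitness_calc_py : Int × List Int := (2, [3, 1])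

def Spec_calc_py (n : Int) (folders : List Int) (out : Int) : Prop := out = calc_py_alt n folders
instance (n : Int) (folders : List Int) (out : Int) : Decidable (Spec_calc_py n folders out) := by unfold Spec_calc_py; infer_instance

-- ===== CLAIM (what is proved, stated in full; the proofs are below) =====
def Claim_equal_calc_py : Prop := ∀ (n : Int) (folders : List Int), Dom_calc_py n folders → Pre_calc_py n folders → Spec_calc_py n folders (calc_py n folders)

-- ===== LEMMAS AND PROOFS =====

-- A's first loop: the accumulated index is in range and its element dominates the prefix.
lemma argmax_inv (l : List Int) (k : Nat) :
    0 ≤ ((PySem.List.pyRange 0 (k : Int) 1).foldl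
        (fun m i => if PySem.List.pyGetD l i 0 > PySem.List.pyGetD l m 0 then i else m) 0) ∧
    ((PySem.List.pyRange 0 (k : Int) 1).foldl
        (fun m i => if PySem.List.pyGetD l i 0 > PySem.List.pyGetD l m 0 then i else m) 0) < max (k : Int) 1 ∧
    ∀ j : Int, 0 ≤ j → j < (k : Int) →
      PySem.List.pyGetD l j 0 ≤ PySem.List.pyGetD l
        ((PySem.List.pyRange 0 (k : Int) 1).foldl
          (fun m i => if PySem.List.pyGetD l i 0 > PySem.List.pyGetD l m 0 then i else m) 0) 0 := by
  induction k with
  | zero =>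
    rw [PySem.List.pyRange_one_eq_nil (by omega)]
    refine ⟨le_refl 0, by norm_num, ?_⟩
    intro j h0 h1; omega
  | succ k ih =>
    have hc : ((k + 1 : Nat) : Int) = (k : Int) + 1 := by push_cast; ring
    rw [hc, PySem.List.pyRange_one_succ_right (by positivity), List.foldl_append]
    obtain ⟨ih0, ih1, ih2⟩ := ih
    simp only [List.foldl]
    split_ifs with h
    · refine ⟨by positivity, by omega, ?_⟩
      intro j h0 h1
      by_cases hj : j < (k : Int)
      · exact le_trans (ih2 j h0 hj) (le_of_lt h)
      · have : j = (k : Int) := by omega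
        rw [this]
    · refine ⟨ih0, by omega, ?_⟩
      intro j h0 h1
      by_cases hj : j < (k : Int)
      · exact ih2 j h0 hj
      · have : j = (k : Int) := by omega
        rw [this]; omega

-- A's second loop: skipping index m is the prefix sum minus l[m] (when 0 ≤ m < k).
lemma sumskip (l : List Int) (k : Nat) (m : Int) :
    (PySem.List.pyRange 0 (k : Int) 1).foldl
      (fun c i => if i == m then c else c + PySem.List.pyGetD l i 0) 0
    = ((PySem.List.pyRange 0 (k : Int) 1).map (fun i => PySem.List.pyGetD l i 0)).sum
      - (if 0 ≤ m ∧ m < (k : Int) then PySem.List.pyGetD l m 0 else 0) := by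
  induction k with
  | zero =>
    rw [PySem.List.pyRange_one_eq_nil (by omega)]
    simp
  | succ k ih =>
    have hc : ((k + 1 : Nat) : Int) = (k : Int) + 1 := by push_cast; ring
    rw [hc, PySem.List.pyRange_one_succ_right (by positivity), List.foldl_append,
        List.map_append, List.sum_append, ih]
    simp only [List.foldl, List.map, List.sum_cons, List.sum_nil, beq_iff_eq]
    by_cases hm : (k : Int) = m
    · subst hm
      have h1 : ¬ (0 ≤ (k:Int) ∧ (k:Int) < (k:Int)) := by omega
      have h2 : (0 ≤ (k:Int) ∧ (k:Int) < (k:Int) + 1) := by omega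
      simp only [if_neg h1, if_pos h2, if_true]
      ring
    · rw [if_neg hm]
      by_cases h : 0 ≤ m ∧ m < (k : Int)
      · rw [if_pos h, if_pos (by omega : 0 ≤ m ∧ m < (k:Int) + 1)]; ring
      · rw [if_neg h, if_neg (by omega : ¬ (0 ≤ m ∧ m < (k:Int) + 1))]; ring

-- The values A iterates over are exactly the first k elements.
lemma map_getD_range (l : List Int) (k : Nat) (hk : k ≤ l.length) :
    (PySem.List.pyRange 0 (k : Int) 1).map (fun i => PySem.List.pyGetD l i 0) = l.take k := by
  induction k with
  | zero => rw [PySem.List.pyRange_one_eq_nil (by omega)]; simp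
  | succ k ih =>
    have hc : ((k + 1 : Nat) : Int) = (k : Int) + 1 := by push_cast; ring
    have hkl : k < l.length := by omega
    rw [hc, PySem.List.pyRange_one_succ_right (by positivity), List.map_append,
        ih (by omega), List.take_add_one]
    simp [PySem.List.pyGetD_natCast, List.getD_eq_getElem?_getD, List.getElem?_eq_getElem hkl]

-- B's fold from a 'some' state: the accumulator is start + old-max + sum − new-max,
-- where the new max dominates everything seen.
lemma foldB_some (l : List Int) (m s : Int) :
    ∃ M, l.foldl
      (fun (st : Int × Option Int) x =>
        match st.2 with
        | none => (st.1, some x)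
        | some m => if x > m then (st.1 + m, some x) else (st.1 + x, st.2))
      (s, some m) = (s + m + l.sum - M, some M)
      ∧ (M = m ∨ M ∈ l) ∧ m ≤ M ∧ ∀ y ∈ l, y ≤ M := by
  induction l generalizing m s with
  | nil => exact ⟨m, by simp, Or.inl rfl, le_refl m, by simp⟩
  | cons x t ih =>
    simp only [List.foldl, List.sum_cons]
    by_cases hx : x > m
    · rw [if_pos hx]
      obtain ⟨M, hfold, hmem, hle, hall⟩ := ih x (s + m)
      refine ⟨M, by rw [hfold]; congr 1; ring, ?_, by omega, ?_⟩
      · rcases hmem with h | h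
        · exact Or.inr (h ▸ List.mem_cons_self)
        · exact Or.inr (List.mem_cons_of_mem x h)
      · intro y hy
        rcases List.mem_cons.mp hy with h | h
        · omega
        · exact hall y h
    · rw [if_neg hx]
      obtain ⟨M, hfold, hmem, hle, hall⟩ := ih m (s + x)
      refine ⟨M, by rw [hfold]; congr 1; ring, ?_, hle, ?_⟩
      · rcases hmem with h | h
        · exact Or.inl h
        · exact Or.inr (List.mem_cons_of_mem x h)
      · intro y hy
        rcases List.mem_cons.mp hy with h | h
        · omega
        · exact hall y h

-- ===== VERDICT (by name: the statement is the Claim_ definition above) =====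
theorem calc_py_spec : Claim_equal_calc_py := by
  intro n folders _ hpre
  unfold Spec_calc_py calc_py calc_py_alt
  by_cases hn : n ≤ 0
  · rw [PySem.List.pyRange_one_eq_nil hn]
    simp [hn]
  · have hlen : n ≤ (folders.length : Int) := by
      rcases hpre with h | h
      · simpa [PySem.List.len_eq] using h
      · omega
    obtain ⟨k, rfl⟩ : ∃ k : Nat, n = (k : Int) := ⟨n.toNat, by omega⟩
    have hk1 : 1 ≤ k := by omega
    have hkl : k ≤ folders.length := by exact_mod_cast hlen
    obtain ⟨hm0, hm1, hmax⟩ := argmax_inv folders k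
    set m := (PySem.List.pyRange 0 (k : Int) 1).foldl
      (fun m i => if PySem.List.pyGetD folders i 0 > PySem.List.pyGetD folders m 0 then i else m) 0 with hmdef
    have hmk : m < (k : Int) := by
      have : max (k : Int) 1 = (k : Int) := by omega
      omega
    rw [sumskip folders k m, map_getD_range folders k hkl, if_pos ⟨hm0, hmk⟩,
        if_neg hn, PySem.List.slice_to_natCast]
    -- analyse B's one-pass fold on the nonempty prefix
    cases hp : folders.take k with
    | nil =>
      have : (folders.take k).length = k := by simp [List.length_take]; omega
      rw [hp] at this; simp at this; omega
    | cons h t =>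
      simp only [List.foldl]
      obtain ⟨M, hfold, hmem, hle, hall⟩ := foldB_some t h 0
      rw [hfold]
      simp only [List.sum_cons]
      have hmval : PySem.List.pyGetD folders m 0 = folders[m.toNat] := by
        exact PySem.List.pyGetD_eq_getElem folders 0 hm0 (by omega)
      have hMprefix : M ∈ folders.take k := by
        rw [hp]
        rcases hmem with hEq | hIn
        · exact hEq ▸ List.mem_cons_self
        · exact List.mem_cons_of_mem h hIn
      have hmmem : folders[m.toNat] ∈ folders.take k := by
        have h1 : m.toNat < (folders.take k).length := by simp [List.length_take]; omega
        have : (folders.take k)[m.toNat] = folders[m.toNat] := List.getElem_take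
        rw [← this]
        exact List.getElem_mem h1
      -- folders[m] ≤ M : folders[m] is in the prefix, which M dominates
      have hle1 : folders[m.toNat] ≤ M := by
        rw [hp] at hmmem
        rcases List.mem_cons.mp hmmem with hEq | hIn
        · omega
        · exact hall _ hIn
      -- M ≤ folders[m] : M is in the prefix, which folders[m] dominates
      have hle2 : M ≤ folders[m.toNat] := by
        obtain ⟨j, hj, hjeq⟩ := List.mem_iff_getElem.mp hMprefix
        have hjk : j < k := by
          have := hj; simp [List.length_take] at this; omega
        have hjl : j < folders.length := by omega
        have : (folders.take k)[j] = folders[j] := List.getElem_take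
        rw [this] at hjeq
        have := hmax (j : Int) (by positivity) (by exact_mod_cast hjk)
        rw [hmval] at this
        have hjval : PySem.List.pyGetD folders (j : Int) 0 = folders[j] := by
          rw [PySem.List.pyGetD_natCast]
          exact List.getD_eq_getElem folders 0 hjl
        rw [hjval] at this
        rw [← hjeq]; exact this
    -- conclude: A's skipped value equals B's retained max
      have hMm : M = folders[m.toNat] := le_antisymm hle2 hle1
      rw [hmval, hMm]
      ring
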